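-- pv_equiv track=rewrite | github.com/sunnyzhengai/Math_Agent_Website | code/quadratics_completing_the_square.py | format_exact_solution
-- ===== SOURCE A (Python) =====
-- import math
--
-- def is_perfect_square(n):
--     """Check if n is a perfect square."""
--     if n < 0:
--         return False
--     sqrt_n = int(math.sqrt(n))
--     return sqrt_n * sqrt_n == n
--
-- def gcd(a, b):
--     """Calculate greatest common divisor."""
--     while b:
--         a, b = b, a % b
--     return abs(a)
--
-- def format_exact_solution(numerator, discriminant, denominator):
--     """
--     Format a single solution in exact form.
--
--     Args:
--         numerator: The constant part (-b)
--         discriminant: The discriminant value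
--         denominator: 2a
--
--     Returns:
--         str: Formatted solution (integer, fraction, or radical form)
--     """
--     # Case 1: Perfect square discriminant (rational solution)
--     if is_perfect_square(discriminant):
--         sqrt_disc = int(math.sqrt(discriminant))
--
--         # Simplified numerator for this solution
--         actual_num = numerator + sqrt_disc
--
--         # Check if it simplifies to an integer
--         if actual_num % denominator == 0:
--             return str(actual_num // denominator)
--
--         # Otherwise show as fraction
--         g = gcd(actual_num, denominator)
--         num = actual_num // g
--         den = denominator // g
--
--         if den == 1:
--             return str(num)
--         return f"{num}/{den}"
--
--     # Case 2: Non-perfect square (irrational - use radical form)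
--     else:
--         # Simplify the radical
--         sqrt_disc = discriminant
--         outside = 1
--
--         # Factor out perfect squares from under the radical
--         i = 2
--         while i * i <= sqrt_disc:
--             while sqrt_disc % (i * i) == 0:
--                 outside *= i
--                 sqrt_disc //= (i * i)
--             i += 1
--
--         # Simplify the fraction part
--         g = gcd(gcd(abs(numerator), outside), denominator)
--         num = numerator // g
--         radical_coef = outside // g
--         den = denominator // g
--
--         # Build the string
--         parts = []
--
--         # Add constant term
--         if num != 0:
--             if den == 1:
--                 parts.append(str(num))
--             else:
--                 parts.append(f"{num}/{den}")
--
--         # Add radical term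
--         radical_str = f"√{sqrt_disc}" if sqrt_disc != 1 else ""
--         if radical_coef == 1 and sqrt_disc == 1:
--             radical_part = "1"
--         elif radical_coef == 1:
--             radical_part = radical_str
--         elif sqrt_disc == 1:
--             radical_part = str(radical_coef)
--         else:
--             radical_part = f"{radical_coef}{radical_str}"
--
--         if den != 1:
--             radical_part = f"{radical_part}/{den}"
--
--         # Combine
--         if len(parts) == 0:
--             return radical_part
--         elif num > 0:
--             return f"{parts[0]} + {radical_part}"
--         else:
--             return f"{parts[0]} + {radical_part}"
-- ===== SOURCE B (Python) =====
-- import math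
--
-- def _split_square(n):
--     """Write n as k**2 * m by scanning DOWN from isqrt(n) for the largest k
--     whose square divides n (no factorization at all)."""
--     if n < 2:
--         return 1, n
--     k = math.isqrt(n)
--     while n % (k * k):
--         k -= 1
--     return k, n // (k * k)
--
-- def _ratio(n, d):
--     return str(n) if d == 1 else f"{n}/{d}"
--
-- def format_exact_solution(numerator, discriminant, denominator):
--     if discriminant >= 0 and math.isqrt(discriminant) ** 2 == discriminant:
--         top = numerator + math.isqrt(discriminant)
--         if top % denominator == 0:
--             return str(top // denominator)
--         g = math.gcd(top, denominator)
--         return _ratio(top // g, denominator // g)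
--     outside, inside = _split_square(discriminant)
--     g = math.gcd(math.gcd(numerator, outside), denominator)
--     num = numerator // g
--     coef = outside // g
--     den = denominator // g
--     if coef == 1 and inside == 1:
--         radical = "1"
--     else:
--         radical = ("" if coef == 1 else str(coef)) + ("" if inside == 1 else f"√{inside}")
--     if den != 1:
--         radical = f"{radical}/{den}"
--     if num == 0:
--         return radical
--     return f"{_ratio(num, den)} + {radical}"
-- ===== Notes on version B (the rewrite author's own statement) =====
-- stated objective: alternative
-- what changed: The radical-simplification core is replaced by a different algorithm: instead of A's nested loops that divide out i*i for every i up to sqrt(d), B scans a single counter DOWN from isqrt(d) and takes the first (hence largest) k with k*k dividing d as the square part, obtaining inside as d // k**2 with one division; the formatting is re-decomposed around a shared _ratio helper and a merged radical-string expression, and the perfect-square test uses math.isqrt.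
import Mathlib
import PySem

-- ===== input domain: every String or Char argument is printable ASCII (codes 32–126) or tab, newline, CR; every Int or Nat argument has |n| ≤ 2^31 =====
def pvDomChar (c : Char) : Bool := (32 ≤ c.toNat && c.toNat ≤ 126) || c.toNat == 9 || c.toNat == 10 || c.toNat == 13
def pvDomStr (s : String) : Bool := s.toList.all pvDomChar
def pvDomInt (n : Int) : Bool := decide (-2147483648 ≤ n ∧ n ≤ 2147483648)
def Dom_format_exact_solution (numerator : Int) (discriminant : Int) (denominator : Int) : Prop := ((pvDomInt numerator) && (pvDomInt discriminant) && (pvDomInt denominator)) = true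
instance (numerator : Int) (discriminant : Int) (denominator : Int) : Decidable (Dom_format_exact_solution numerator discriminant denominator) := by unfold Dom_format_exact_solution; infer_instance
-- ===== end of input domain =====

-- B replaces A's nested prime-by-prime square-extraction loops by a single downward scan
-- from isqrt(d) for the largest k with k² | d (no factorization at all), and re-decomposes
-- the string assembly around a shared ratio helper; objective: alternative (same cost).

-- ===== PORT A =====

-- is_perfect_square: int(math.sqrt(n)) is ported as Nat.sqrt — exact for every value this
-- function uses on the stated domain 0 ≤ n ≤ 2^31 (the float sqrt can only exceed isqrt on
-- non-squares just below a square, where the == test is false either way)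
def isPerfectSquareA (n : Int) : Bool :=
  if n < 0 then false else Nat.sqrt n.toNat * Nat.sqrt n.toNat == n.toNat

-- termination fact for gcdA's loop (named so the compiled definition stays small)
theorem gcdA_dec (a b : Int) (hb : b ≠ 0) : (PySem.Int.mod a b).natAbs < b.natAbs := by
  have h1 := PySem.Int.mod_nonneg a (b := b)
  have h2 := PySem.Int.mod_lt a (b := b)
  have h3 := PySem.Int.mod_neg_bounds a (b := b)
  rcases lt_or_gt_of_ne hb with hb' | hb'
  · have := h3 hb'; omega
  · have := h1 hb'; have := h2 hb'; omega

-- gcd: while b: a, b = b, a % b; return abs(a)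
def gcdA (a b : Int) : Int :=
  if _h : b ≠ 0 then gcdA b (PySem.Int.mod a b) else (a.natAbs : Int)
termination_by b.natAbs
decreasing_by exact gcdA_dec a b _h

-- inner while of A: while sqrt_disc % (i*i) == 0: outside *= i; sqrt_disc //= i*i
-- (the 1 ≤ s ∧ 2 ≤ i conjuncts only make the recursion total; they hold at every reachable call)
theorem innerA_dec (i s : Int) (h : 1 ≤ s ∧ 2 ≤ i ∧ PySem.Int.mod s (i * i) = 0) :
    (PySem.Int.floordiv s (i * i)).toNat < s.toNat := by
  obtain ⟨hs, hi, hm⟩ := h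
  have hii : (0:Int) < i * i := by nlinarith
  have hdvd : (i * i) ∣ s := (PySem.Int.mod_eq_zero_iff_dvd s (i * i)).1 hm
  rw [PySem.Int.floordiv_eq_ediv_of_pos hii]
  obtain ⟨c, rfl⟩ := hdvd
  rw [Int.mul_ediv_cancel_left _ (by positivity)]
  have hc : 1 ≤ c := by nlinarith
  have h1 : c < i * i * c := by nlinarith
  omega

def innerA (i : Int) (s : Int) (out : Int) : Int × Int :=
  if _h : 1 ≤ s ∧ 2 ≤ i ∧ PySem.Int.mod s (i * i) = 0 then
    innerA i (PySem.Int.floordiv s (i * i)) (out * i)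
  else (out, s)
termination_by s.toNat
decreasing_by exact innerA_dec i s _h

-- innerA only shrinks its positive second component (cited by outerA's decreasing_by)
theorem innerA_bounds (i : Int) (s out : Int) (hs : 1 ≤ s) :
    1 ≤ (innerA i s out).2 ∧ (innerA i s out).2 ≤ s := by
  induction s, out using innerA.induct i with
  | case1 s o h ih =>
      rw [innerA, dif_pos h]
      obtain ⟨hs1, hi2, hm⟩ := h
      have hii : (0:Int) < i * i := by nlinarith
      have hdvd : (i * i) ∣ s := (PySem.Int.mod_eq_zero_iff_dvd s (i * i)).1 hm
      have hq : (1:Int) ≤ PySem.Int.floordiv s (i * i) := by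
        rw [PySem.Int.floordiv_eq_ediv_of_pos hii]
        obtain ⟨c, rfl⟩ := hdvd
        rw [Int.mul_ediv_cancel_left _ (by positivity)]
        nlinarith
      have := ih hq
      refine ⟨this.1, le_trans this.2 ?_⟩
      rw [PySem.Int.floordiv_eq_ediv_of_pos hii]
      obtain ⟨c, rfl⟩ := hdvd
      rw [Int.mul_ediv_cancel_left _ (by positivity)]
      nlinarith
  | case2 s o h => rw [innerA, dif_neg h]; exact ⟨hs, le_refl s⟩

-- outer while of A: while i*i <= sqrt_disc: (inner); i += 1   (2 ≤ i again only for totality)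
theorem outerA_dec (i s out : Int) (h : 2 ≤ i ∧ i * i ≤ s) :
    ((innerA i s out).2 + 1 - (i + 1)).toNat < (s + 1 - i).toNat := by
  obtain ⟨hi, his⟩ := h
  have hle := innerA_bounds i s out (by nlinarith)
  have h2 : i ≤ s := by nlinarith
  omega

def outerA (i : Int) (s : Int) (out : Int) : Int × Int :=
  if _h : 2 ≤ i ∧ i * i ≤ s then
    let p := innerA i s out
    outerA (i + 1) p.2 p.1
  else (out, s)
termination_by (s + 1 - i).toNat
decreasing_by exact outerA_dec i s out _h

def format_exact_solution (numerator : Int) (discriminant : Int) (denominator : Int) : String :=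
  if isPerfectSquareA discriminant then
    let sqrtDisc : Int := (Nat.sqrt discriminant.toNat : Int)
    let actualNum := numerator + sqrtDisc
    if PySem.Int.mod actualNum denominator = 0 then
      PySem.Int.toStr (PySem.Int.floordiv actualNum denominator)
    else
      let g := gcdA actualNum denominator
      let num := PySem.Int.floordiv actualNum g
      let den := PySem.Int.floordiv denominator g
      if den = 1 then PySem.Int.toStr num
      else PySem.Int.toStr num ++ "/" ++ PySem.Int.toStr den
  else
    let p := outerA 2 discriminant 1
    let outside := p.1
    let sqrtDisc := p.2
    let g := gcdA (gcdA (numerator.natAbs : Int) outside) denominator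
    let num := PySem.Int.floordiv numerator g
    let radicalCoef := PySem.Int.floordiv outside g
    let den := PySem.Int.floordiv denominator g
    let parts : List String :=
      if num ≠ 0 then
        [if den = 1 then PySem.Int.toStr num
         else PySem.Int.toStr num ++ "/" ++ PySem.Int.toStr den]
      else []
    let radicalStr := if sqrtDisc ≠ 1 then "√" ++ PySem.Int.toStr sqrtDisc else ""
    let radicalPart :=
      if radicalCoef = 1 ∧ sqrtDisc = 1 then "1"
      else if radicalCoef = 1 then radicalStr
      else if sqrtDisc = 1 then PySem.Int.toStr radicalCoef
      else PySem.Int.toStr radicalCoef ++ radicalStr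
    let radicalPart := if den ≠ 1 then radicalPart ++ "/" ++ PySem.Int.toStr den else radicalPart
    match parts with
    | [] => radicalPart
    | p0 :: _ => if num > 0 then p0 ++ " + " ++ radicalPart else p0 ++ " + " ++ radicalPart

-- ===== PORT B =====

-- B's while loop 'while n % (k*k): k -= 1', entered at k = isqrt(n): structural recursion on k.
-- The k = 0 case is unreachable from splitSquareB (k = 1 always stops, n % 1 == 0); Python
-- would raise ZeroDivisionError there.
def scanB (n : Int) : Nat → Nat
  | 0 => 0
  | k + 1 =>
      if PySem.Int.mod n (((k + 1 : Nat) : Int) * ((k + 1 : Nat) : Int)) = 0 then k + 1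
      else scanB n k

-- _split_square: n = k² * m with k the LARGEST integer whose square divides n
def splitSquareB (n : Int) : Int × Int :=
  if n < 2 then (1, n)
  else
    let k := scanB n (Nat.sqrt n.toNat)    -- math.isqrt
    ((k : Int), PySem.Int.floordiv n ((k : Int) * (k : Int)))

def ratioB (n : Int) (d : Int) : String :=
  if d = 1 then PySem.Int.toStr n else PySem.Int.toStr n ++ "/" ++ PySem.Int.toStr d

def format_exact_solution_alt (numerator : Int) (discriminant : Int) (denominator : Int) : String :=
  -- math.isqrt is Nat.sqrt
  if 0 ≤ discriminant ∧ Nat.sqrt discriminant.toNat ^ 2 = discriminant.toNat then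
    let top := numerator + (Nat.sqrt discriminant.toNat : Int)
    if PySem.Int.mod top denominator = 0 then
      PySem.Int.toStr (PySem.Int.floordiv top denominator)
    else
      let g : Int := (Int.gcd top denominator : Int)   -- math.gcd
      ratioB (PySem.Int.floordiv top g) (PySem.Int.floordiv denominator g)
  else
    let oi := splitSquareB discriminant
    let g : Int := (Int.gcd (Int.gcd numerator oi.1) denominator : Int)   -- math.gcd(math.gcd(.,.),.)
    let num := PySem.Int.floordiv numerator g
    let coef := PySem.Int.floordiv oi.1 g
    let den := PySem.Int.floordiv denominator g
    let radical :=
      if coef = 1 ∧ oi.2 = 1 then "1"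
      else (if coef = 1 then "" else PySem.Int.toStr coef) ++
           (if oi.2 = 1 then "" else "√" ++ PySem.Int.toStr oi.2)
    let radical := if den ≠ 1 then radical ++ "/" ++ PySem.Int.toStr den else radical
    if num = 0 then radical else ratioB num den ++ " + " ++ radical

-- ===== PRECONDITION & SPEC =====

-- Pre_ excludes exactly the inputs where A raises ZeroDivisionError: a perfect-square
-- discriminant together with denominator = 0 (B raises there too). The bound 46341 on the
-- square root covers every discriminant of the stated domain (46341² > 2^31).
def Pre_format_exact_solution (numerator : Int) (discriminant : Int) (denominator : Int) : Prop :=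
  (0 ≤ discriminant ∧ ∃ k : Nat, k ≤ 46341 ∧ k * k = discriminant.toNat) →
    denominator ≠ 0

instance (numerator : Int) (discriminant : Int) (denominator : Int) : Decidable (Pre_format_exact_solution numerator discriminant denominator) := by unfold Pre_format_exact_solution; infer_instance

def pvWitness_format_exact_solution : Int × Int × Int := (1, -5, 2)

def Spec_format_exact_solution (numerator : Int) (discriminant : Int) (denominator : Int) (out : String) : Prop := out = format_exact_solution_alt numerator discriminant denominator
instance (numerator : Int) (discriminant : Int) (denominator : Int) (out : String) : Decidable (Spec_format_exact_solution numerator discriminant denominator out) := by unfold Spec_format_exact_solution; infer_instance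

-- ===== CLAIM (what is proved, stated in full; the proofs are below) =====
def Claim_equal_format_exact_solution : Prop := ∀ (numerator : Int) (discriminant : Int) (denominator : Int), Dom_format_exact_solution numerator discriminant denominator → Pre_format_exact_solution numerator discriminant denominator → Spec_format_exact_solution numerator discriminant denominator (format_exact_solution numerator discriminant denominator)

-- ===== LEMMAS AND PROOFS =====

-- A's hand-written Euclid gcd is the library gcd
theorem gcdA_eq (a b : Int) : gcdA a b = (Int.gcd a b : Int) := by
  induction a, b using gcdA.induct with
  | case1 a b hb ih =>
      rw [gcdA, dif_pos hb, ih]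
      congr 1
      have h := PySem.Int.floordiv_mul_add_mod a b
      have hm : PySem.Int.mod a b = a + -PySem.Int.floordiv a b * b := by linarith
      rw [hm, Int.gcd_add_mul_right_right, Int.gcd_comm]
  | case2 a b hb =>
      rw [gcdA, dif_neg hb]
      rw [ne_eq, not_not] at hb
      subst hb
      rw [Int.gcd_zero_right]

-- no square ≥ 4 divides t → t squarefree
theorem squarefree_of_no_sq (t : Int) (ht : 1 ≤ t) (h : ∀ j, 2 ≤ j → ¬ (j * j ∣ t)) :
    Squarefree t := by
  intro x hx
  by_contra hu
  have hx0 : x ≠ 0 := by rintro rfl; simp at hx; omega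
  have h2 : 2 ≤ (x.natAbs : Int) := by
    have : x.natAbs ≠ 1 := by
      intro h1
      exact hu (Int.isUnit_iff.2 (by omega))
    omega
  refine h (x.natAbs : Int) h2 ?_
  have hms : ((x.natAbs : Int)) * (x.natAbs : Int) = x * x := Int.natAbs_mul_self
  rwa [hms]

-- specification of A's inner while-loop
theorem innerA_spec (i s out : Int) (hi : 2 ≤ i) (hs : 1 ≤ s) :
    ∃ (e : ℕ) (t : Int), innerA i s out = (out * i ^ e, t) ∧ s = i ^ (2 * e) * t ∧
      1 ≤ t ∧ ¬ (i * i ∣ t) := by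
  induction s, out using innerA.induct i with
  | case1 s o h ih =>
      obtain ⟨hs1, hi2, hm⟩ := h
      have hii : (0:Int) < i * i := by nlinarith
      have hdvd : (i * i) ∣ s := (PySem.Int.mod_eq_zero_iff_dvd s (i * i)).1 hm
      obtain ⟨c, hc⟩ := hdvd
      have hfd : PySem.Int.floordiv s (i * i) = c := by
        rw [PySem.Int.floordiv_eq_ediv_of_pos hii, hc, Int.mul_ediv_cancel_left _ (by positivity)]
      have hc1 : 1 ≤ c := by nlinarith
      obtain ⟨e, t, h1, h2, h3, h4⟩ := ih (by rw [hfd]; exact hc1)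
      refine ⟨e + 1, t, ?_, ?_, h3, h4⟩
      · rw [innerA, dif_pos ⟨hs1, hi2, hm⟩, h1, Prod.mk.injEq]
        exact ⟨by rw [pow_succ]; ring, rfl⟩
      · rw [hfd] at h2
        rw [hc, h2]
        have he : 2 * (e + 1) = 2 * e + 2 := by ring
        rw [he, pow_add]
        ring
  | case2 s o h =>
      refine ⟨0, s, ?_, by ring, hs, ?_⟩
      · rw [innerA, dif_neg h]
        simp
      · intro hdvd
        exact h ⟨hs, hi, (PySem.Int.mod_eq_zero_iff_dvd s (i * i)).2 hdvd⟩

-- specification of A's outer while-loop: it extracts a square and leaves a remainder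
-- that no square ≥ 4 divides
theorem outerA_spec (i s out : Int) (hi : 2 ≤ i) (hs : 1 ≤ s)
    (hinv : ∀ j, 2 ≤ j → j < i → ¬ (j * j ∣ s)) :
    ∃ c t, outerA i s out = (out * c, t) ∧ 1 ≤ c ∧ 1 ≤ t ∧ s = c ^ 2 * t ∧
      (∀ j, 2 ≤ j → ¬ (j * j ∣ t)) := by
  induction i, s, out using outerA.induct with
  | case1 i s o h p ih =>
      obtain ⟨hi2, his⟩ := h
      have hp' : p = innerA i s o := rfl
      obtain ⟨e, t1, hI1, hI2, hI3, hI4⟩ := innerA_spec i s o hi2 (by nlinarith)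
      have hinv' : ∀ j, 2 ≤ j → j < i + 1 → ¬ (j * j ∣ t1) := by
        intro j hj hji hdvd
        have ht1s : t1 ∣ s := ⟨i ^ (2 * e), by rw [hI2]; ring⟩
        rcases lt_or_ge j i with hji' | hji'
        · exact hinv j hj hji' (hdvd.trans ht1s)
        · have hji'' : j = i := by omega
          subst hji''
          exact hI4 hdvd
      have ih' := ih (by omega)
      simp only [hp', hI1] at ih'
      obtain ⟨c, t, hO1, hc1, ht1, hO2, hO3⟩ := ih' hI3 hinv'
      refine ⟨i ^ e * c, t, ?_, ?_, ht1, ?_, hO3⟩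
      · rw [outerA, dif_pos ⟨hi2, his⟩]
        show outerA (i+1) (innerA i s o).2 (innerA i s o).1 = (o * (i ^ e * c), t)
        rw [hI1]
        show outerA (i+1) t1 (o * i ^ e) = (o * (i ^ e * c), t)
        rw [hO1, Prod.mk.injEq]
        exact ⟨by ring, rfl⟩
      · have hpe : (1:Int) ≤ i ^ e := one_le_pow₀ (by omega)
        nlinarith
      · rw [hI2, hO2]
        have he : 2 * e = e * 2 := by ring
        rw [he, pow_mul]
        ring
  | case2 i s o h =>
      refine ⟨1, s, ?_, le_refl 1, hs, by ring, ?_⟩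
      · rw [outerA, dif_neg h, mul_one]
      · intro j hj hdvd
        rcases lt_or_ge j i with hji | hji
        · exact hinv j hj hji hdvd
        · have hsi : ¬ (i * i ≤ s) := fun hh => h ⟨hi, hh⟩
          have hjs : j * j ≤ s := Int.le_of_dvd (by omega) hdvd
          nlinarith

-- k² ∣ c²·t with t squarefree forces k ∣ c (in ℕ, via factorizations)
theorem sq_dvd_of_squarefree (k c t : ℕ) (hc : c ≠ 0) (ht : Squarefree t)
    (h : k ^ 2 ∣ c ^ 2 * t) : k ∣ c := by
  have ht0 : t ≠ 0 := ht.ne_zero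
  have hct : c ^ 2 * t ≠ 0 := by positivity
  rcases Nat.eq_zero_or_pos k with rfl | hk
  · exfalso
    have : c ^ 2 * t = 0 := Nat.eq_zero_of_zero_dvd (by simpa using h)
    exact hct this
  · have hk0 : k ≠ 0 := by omega
    have hfle := (Nat.factorization_le_iff_dvd (by positivity) hct).2 h
    have hft := (Nat.squarefree_iff_factorization_le_one ht0).1 ht
    rw [← Nat.factorization_le_iff_dvd hk0 hc, Finsupp.le_def]
    intro p
    have h1 := Finsupp.le_def.1 hfle p
    rw [Nat.factorization_pow, Nat.factorization_mul (pow_ne_zero 2 hc) ht0,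
        Nat.factorization_pow] at h1
    have h2 := hft p
    simp only [Finsupp.coe_add, Finsupp.coe_smul, Pi.add_apply, Pi.smul_apply,
      smul_eq_mul] at h1
    omega

-- B's downward scan finds the largest k with k² | n, given one exists below the start
theorem scanB_spec (n : Int) (c : Nat) (hc : 1 ≤ c)
    (hdvd : PySem.Int.mod n (((c : Nat) : Int) * ((c : Nat) : Int)) = 0)
    (hmax : ∀ j : Nat, c < j → PySem.Int.mod n (((j : Nat) : Int) * ((j : Nat) : Int)) ≠ 0) :
    ∀ K, c ≤ K → scanB n K = c := by
  intro K
  induction K with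
  | zero => intro h; omega
  | succ k ih =>
      intro hcK
      rw [scanB]
      split_ifs with hm
      · by_contra hne
        exact hmax (k + 1) (by omega) hm
      · have hck : c ≤ k := by
          rcases Nat.lt_or_ge c (k + 1) with h1 | h1
          · omega
          · exfalso; have : c = k + 1 := by omega
            subst this; exact hm hdvd
        exact ih hck

-- the two radical-extraction cores agree on every non-perfect-square discriminant
theorem core_eq (d : Int) (hns : ¬ (0 ≤ d ∧ Nat.sqrt d.toNat ^ 2 = d.toNat)) :
    outerA 2 d 1 = splitSquareB d := by
  rcases lt_or_ge d 2 with hd | hd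
  · have hd0 : d < 0 := by
      by_contra h0
      rw [not_lt] at h0
      have : d = 0 ∨ d = 1 := by omega
      rcases this with rfl | rfl
      · exact hns ⟨by norm_num, by decide⟩
      · exact hns ⟨by norm_num, by decide⟩
    rw [splitSquareB, if_pos hd, outerA, dif_neg (by rintro ⟨-, h4⟩; omega)]
  · obtain ⟨c, t, hA1, hc1, ht1, hA2, hA3⟩ :=
      outerA_spec 2 d 1 (le_refl 2) (by omega) (by intro j hj hji; omega)
    rw [one_mul] at hA1
    have hsf_t : Squarefree t := squarefree_of_no_sq t ht1 hA3
    -- c in ℕ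
    set cN := c.toNat with hcN
    have hcc : (cN : Int) = c := Int.toNat_of_nonneg (by omega)
    have hcN1 : 1 ≤ cN := by omega
    -- c² divides d
    have hdvdc : ((cN : Int) * (cN : Int)) ∣ d := by
      rw [hcc]; exact ⟨t, by rw [hA2]; ring⟩
    -- maximality: no j > cN has j² ∣ d
    have hmax : ∀ j : Nat, cN < j → ¬ (((j : Nat) : Int) * ((j : Nat) : Int) ∣ d) := by
      intro j hj hdvdj
      -- pass to ℕ
      have hdN : (j * j : ℕ) ∣ d.toNat := by
        have h0 : ((j * j : ℕ) : Int) ∣ d := by push_cast; exact hdvdj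
        have hd' : d = ((d.toNat : ℕ) : Int) := (Int.toNat_of_nonneg (by omega)).symm
        rw [hd'] at h0
        exact_mod_cast h0
      have hdEq : d.toNat = cN ^ 2 * t.toNat := by
        have : ((d.toNat : Int)) = ((cN ^ 2 * t.toNat : ℕ) : Int) := by
          push_cast
          rw [Int.toNat_of_nonneg (by omega : (0:Int) ≤ d), hcc,
              Int.toNat_of_nonneg (by omega : (0:Int) ≤ t)]
          exact hA2
        exact_mod_cast this
      have hsfN : Squarefree t.toNat := by
        rw [← Int.squarefree_natAbs] at hsf_t
        have : t.toNat = t.natAbs := by omega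
        rwa [this]
      have hjc : j ∣ cN := by
        apply sq_dvd_of_squarefree j cN t.toNat (by omega) hsfN
        rw [← hdEq]
        have : j ^ 2 = j * j := by ring
        rwa [this]
      have : j ≤ cN := Nat.le_of_dvd (by omega) hjc
      omega
    -- cN ≤ isqrt d
    have hcle : cN ≤ Nat.sqrt d.toNat := by
      rw [Nat.le_sqrt]
      have h1 : (cN : Int) * (cN : Int) ≤ d := by
        rw [hcc, hA2]; nlinarith
      have h2 : ((cN * cN : ℕ) : Int) ≤ ((d.toNat : ℕ) : Int) := by
        push_cast
        rwa [Int.toNat_of_nonneg (by omega : (0:Int) ≤ d)]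
      exact_mod_cast h2
    have hscan : scanB d (Nat.sqrt d.toNat) = cN := by
      apply scanB_spec d cN hcN1
      · exact (PySem.Int.mod_eq_zero_iff_dvd d _).2 hdvdc
      · intro j hj hm
        exact hmax j hj ((PySem.Int.mod_eq_zero_iff_dvd d _).1 hm)
      · exact hcle
    rw [hA1, splitSquareB, if_neg (by omega)]
    show _ = ((scanB d (Nat.sqrt d.toNat) : Int),
      PySem.Int.floordiv d ((scanB d (Nat.sqrt d.toNat) : Int) * (scanB d (Nat.sqrt d.toNat) : Int)))
    rw [hscan, hcc, Prod.mk.injEq]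
    refine ⟨rfl, ?_⟩
    rw [PySem.Int.floordiv_eq_ediv_of_pos (by nlinarith), hA2]
    have : c ^ 2 * t = c * c * t := by ring
    rw [this, Int.mul_ediv_cancel_left _ (by nlinarith)]

-- A's float-based perfect-square test, on Dom, is B's isqrt-based test
theorem isPS_iff (d : Int) :
    isPerfectSquareA d = true ↔ (0 ≤ d ∧ Nat.sqrt d.toNat ^ 2 = d.toNat) := by
  unfold isPerfectSquareA
  split_ifs with h
  · simp
    omega
  · simp [beq_iff_eq, pow_two]
    omega

theorem gcd_natAbs_left (a b : Int) : Int.gcd ((a.natAbs : Int)) b = Int.gcd a b := by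
  simp [Int.gcd, Int.natAbs_abs]

-- assembly lemma over abstract atoms: A's parts-list build equals B's merged expression
theorem assemble_eq (num coef den ins : Int) :
    (let parts : List String :=
      if num ≠ 0 then
        [if den = 1 then PySem.Int.toStr num
         else PySem.Int.toStr num ++ "/" ++ PySem.Int.toStr den]
      else [];
     let radicalStr := if ins ≠ 1 then "√" ++ PySem.Int.toStr ins else "";
     let radicalPart :=
      if coef = 1 ∧ ins = 1 then "1"
      else if coef = 1 then radicalStr
      else if ins = 1 then PySem.Int.toStr coef
      else PySem.Int.toStr coef ++ radicalStr;
     let radicalPart := if den ≠ 1 then radicalPart ++ "/" ++ PySem.Int.toStr den else radicalPart;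
     match parts with
     | [] => radicalPart
     | p0 :: _ => if num > 0 then p0 ++ " + " ++ radicalPart else p0 ++ " + " ++ radicalPart)
    = (let radical :=
        if coef = 1 ∧ ins = 1 then "1"
        else (if coef = 1 then "" else PySem.Int.toStr coef) ++
             (if ins = 1 then "" else "√" ++ PySem.Int.toStr ins);
       let radical := if den ≠ 1 then radical ++ "/" ++ PySem.Int.toStr den else radical;
       if num = 0 then radical
       else (if den = 1 then PySem.Int.toStr num
             else PySem.Int.toStr num ++ "/" ++ PySem.Int.toStr den) ++ " + " ++ radical) := by
  have hrad :
      (if coef = 1 ∧ ins = 1 then "1"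
       else if coef = 1 then (if ins ≠ 1 then "√" ++ PySem.Int.toStr ins else "")
       else if ins = 1 then PySem.Int.toStr coef
       else PySem.Int.toStr coef ++ (if ins ≠ 1 then "√" ++ PySem.Int.toStr ins else ""))
      = (if coef = 1 ∧ ins = 1 then "1"
         else (if coef = 1 then "" else PySem.Int.toStr coef) ++
              (if ins = 1 then "" else "√" ++ PySem.Int.toStr ins)) := by
    by_cases hc : coef = 1 <;> by_cases hi : ins = 1 <;>
      simp [hc, hi, String.empty_append, String.append_empty]
  simp only []
  rw [hrad]
  by_cases hn : num = 0
  · simp [hn]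
  · simp only [ne_eq, hn, not_false_eq_true, if_true]
    split_ifs <;> simp_all

-- ===== VERDICT (by name: the statement is the Claim_ definition above) =====
theorem format_exact_solution_spec : Claim_equal_format_exact_solution := by
  intro n d den _hdom _hpre
  show format_exact_solution n d den = format_exact_solution_alt n d den
  rw [format_exact_solution, format_exact_solution_alt]
  by_cases hsq : (0 ≤ d ∧ Nat.sqrt d.toNat ^ 2 = d.toNat)
  · rw [if_pos ((isPS_iff d).2 hsq), if_pos hsq]
    simp only [gcdA_eq, ratioB]
  · rw [if_neg (fun h => hsq ((isPS_iff d).1 h)), if_neg hsq]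
    rw [← core_eq d hsq]
    simp only [gcdA_eq, gcd_natAbs_left, ratioB]
    exact assemble_eq _ _ _ _
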